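-- pv_equiv track=rewrite | github.com/skdltn210/Algorithm | 프로그래머스/lv2/42888. 오픈채팅방/오픈채팅방.py | solution
-- ===== SOURCE A (Python) =====
-- def solution(record):
--     uid_name = {}
--     for i in range(len(record)):
--         s=list(map(str,record[i].split()))
--         if s[0]=="Enter" or s[0]=="Change":
--             uid_name[s[1]] = s[2]
--     result = []
--     for i in range(len(record)):
--         s=list(map(str,record[i].split()))
--         if s[0]=="Enter":
--             result.append(f'{uid_name[s[1]]}님이 들어왔습니다.')
--         elif s[0]=="Leave":
--             result.append(f'{uid_name[s[1]]}님이 나갔습니다.')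
--     return result
-- ===== SOURCE B (Python) =====
-- def solution(record):
--     uid_name = {}
--     events = []
--     for line in record:
--         parts = line.split()
--         op = parts[0]
--         if op == "Enter":
--             uid_name[parts[1]] = parts[2]
--             events.append((parts[1], True))
--         elif op == "Change":
--             uid_name[parts[1]] = parts[2]
--         elif op == "Leave":
--             events.append((parts[1], False))
--     return [f'{uid_name[uid]}님이 들어왔습니다.' if came_in else f'{uid_name[uid]}님이 나갔습니다.'
--             for uid, came_in in events]
-- ===== Notes on version B (the rewrite author's own statement) =====
-- stated objective: faster
-- what changed: B parses each record line once in a single pass that both maintains uid->name and collects (uid, direction) event tuples, then renders messages from the pre-parsed event list, instead of A's two passes that each re-split every raw line.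
import Mathlib
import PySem

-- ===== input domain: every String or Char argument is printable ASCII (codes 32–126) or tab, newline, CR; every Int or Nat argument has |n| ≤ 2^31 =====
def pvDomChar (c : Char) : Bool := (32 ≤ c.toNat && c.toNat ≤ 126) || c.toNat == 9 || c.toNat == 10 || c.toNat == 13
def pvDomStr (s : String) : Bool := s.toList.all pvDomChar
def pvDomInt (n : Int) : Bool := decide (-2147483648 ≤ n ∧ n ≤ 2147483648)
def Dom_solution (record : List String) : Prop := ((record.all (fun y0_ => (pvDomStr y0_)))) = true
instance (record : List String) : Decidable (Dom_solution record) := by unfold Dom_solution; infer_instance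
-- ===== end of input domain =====

-- B parses each line once, building the uid->name map and a list of (uid, direction) events in a
-- single pass, then renders the messages from the events instead of re-splitting the raw records.

-- ===== PORT A =====
-- first loop: uid_name[s[1]] = s[2] on Enter/Change
def pvStepA (d : PySem.Dict String String) (r : String) : PySem.Dict String String :=
  match PySem.Str.split₀ r with
  | c :: rest =>
    if c == "Enter" || c == "Change" then
      match rest with
      | u :: n :: _ => d.insert u n
      | _ => d            -- Python raises IndexError here (excluded by Pre_)
    else d
  | [] => d               -- Python raises IndexError here (excluded by Pre_)

-- second loop body: append the message for Enter / Leave lines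
def pvStepA2 (d : PySem.Dict String String) (res : List String) (r : String) : List String :=
  match PySem.Str.split₀ r with
  | c :: rest =>
    if c == "Enter" then
      match rest with
      | u :: _ =>
        match d.get? u with
        | some n => res ++ [n ++ "님이 들어왔습니다."]
        | none => res     -- Python raises KeyError here (excluded by Pre_)
      | [] => res         -- Python raises IndexError here (excluded by Pre_)
    else if c == "Leave" then
      match rest with
      | u :: _ =>
        match d.get? u with
        | some n => res ++ [n ++ "님이 나갔습니다."]
        | none => res     -- KeyError (excluded by Pre_)
      | [] => res         -- IndexError (excluded by Pre_)
    else res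
  | [] => res             -- IndexError (excluded by Pre_)

def solution (record : List String) : List String :=
  let d := record.foldl pvStepA PySem.Dict.empty
  record.foldl (pvStepA2 d) []

-- ===== PORT B =====
-- single pass: thread (uid_name, events); parse each line exactly once
def pvStepB (st : PySem.Dict String String × List (String × Bool)) (r : String) :
    PySem.Dict String String × List (String × Bool) :=
  match PySem.Str.split₀ r with
  | c :: rest =>
    if c == "Enter" then
      match rest with
      | u :: n :: _ => (st.1.insert u n, st.2 ++ [(u, true)])
      | _ => st         -- Python raises IndexError here (excluded by Pre_)
    else if c == "Change" then
      match rest with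
      | u :: n :: _ => (st.1.insert u n, st.2)
      | _ => st         -- IndexError (excluded by Pre_)
    else if c == "Leave" then
      match rest with
      | u :: _ => (st.1, st.2 ++ [(u, false)])
      | [] => st        -- IndexError (excluded by Pre_)
    else st
  | [] => st            -- IndexError (excluded by Pre_)

-- render one event from the final uid->name map
def pvMsg (d : PySem.Dict String String) (e : String × Bool) : String :=
  (match d.get? e.1 with | some n => n | none => "") ++   -- none: KeyError (excluded by Pre_)
  (if e.2 then "님이 들어왔습니다." else "님이 나갔습니다.")

def solution_alt (record : List String) : List String :=
  let st := record.foldl pvStepB (PySem.Dict.empty, [])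
  st.2.map (pvMsg st.1)

-- ===== PRECONDITION & SPEC =====
-- some line of record registers uid u via Enter/Change (so that uid_name has the key u)
def pvEntered (record : List String) (u : String) : Bool :=
  record.any (fun r =>
    match PySem.Str.split₀ r with
    | c :: uu :: _ :: _ => (c == "Enter" || c == "Change") && uu == u
    | _ => false)

def pvLineOK (record : List String) (r : String) : Bool :=
  match PySem.Str.split₀ r with
  | [] => false
  | c :: rest =>
    if c == "Enter" || c == "Change" then decide (2 ≤ rest.length)
    else if c == "Leave" then
      match rest with
      | u :: _ => pvEntered record u
      | [] => false
    else true

-- Pre_ excludes exactly the inputs where A raises: a line with no token (IndexError on s[0]),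
-- an Enter/Change line with fewer than 3 tokens (IndexError on s[1]/s[2]), a Leave line with no
-- uid token (IndexError), or a Leave uid never registered by any Enter/Change line (KeyError).
def Pre_solution (record : List String) : Prop := record.all (pvLineOK record) = true
instance (record : List String) : Decidable (Pre_solution record) := by unfold Pre_solution; infer_instance

def pvWitness_solution : List String :=
  ["Enter uid1234 Muzi", "Enter uid4567 Prodo", "Leave uid1234",
   "Enter uid1234 Prodo", "Change uid4567 Ryan"]

def Spec_solution (record : List String) (out : List String) : Prop := out = solution_alt record
instance (record : List String) (out : List String) : Decidable (Spec_solution record out) := by unfold Spec_solution; infer_instance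

-- ===== CLAIM (what is proved, stated in full; the proofs are below) =====
def Claim_equal_solution : Prop := ∀ (record : List String), Dom_solution record → Pre_solution record → Spec_solution record (solution record)

-- ===== LEMMAS AND PROOFS =====

-- the events B collects on one line
def pvEv (r : String) : List (String × Bool) :=
  match PySem.Str.split₀ r with
  | c :: u :: _ :: _ => if c == "Enter" then [(u, true)] else if c == "Leave" then [(u, false)] else []
  | c :: u :: [] => if c == "Leave" then [(u, false)] else []
  | _ => []

theorem pvStepB_eq (d : PySem.Dict String String) (ev : List (String × Bool)) (r : String) :
    pvStepB (d, ev) r = (pvStepA d r, ev ++ pvEv r) := by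
  unfold pvStepB pvStepA pvEv
  rcases h : PySem.Str.split₀ r with _ | ⟨c, rest⟩
  · simp
  · rcases rest with _ | ⟨u, _ | ⟨n, rest3⟩⟩ <;>
      simp only [beq_iff_eq] <;>
      by_cases hE : c = "Enter" <;> by_cases hC : c = "Change" <;> by_cases hL : c = "Leave" <;>
      simp_all

theorem pvFoldB_eq (l : List String) (d : PySem.Dict String String) (ev : List (String × Bool)) :
    l.foldl pvStepB (d, ev) = (l.foldl pvStepA d, ev ++ l.flatMap pvEv) := by
  induction l generalizing d ev with
  | nil => simp
  | cons r t ih =>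
    simp only [List.foldl_cons, pvStepB_eq, List.flatMap_cons, ih, List.append_assoc]

theorem pvStepA_mono (d : PySem.Dict String String) (r : String) (u : String)
    (h : (d.get? u).isSome) : ((pvStepA d r).get? u).isSome := by
  unfold pvStepA
  rcases PySem.Str.split₀ r with _ | ⟨c, rest⟩
  · exact h
  · by_cases hc : (c == "Enter" || c == "Change") = true
    · simp only [hc, if_true]
      rcases rest with _ | ⟨u', _ | ⟨n, rest3⟩⟩
      · exact h
      · exact h
      · simp only [PySem.Dict.get?_insert]
        split <;> simp_all
    · simp only [hc]
      exact h

theorem pvFoldA_mono (l : List String) (d : PySem.Dict String String) (u : String)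
    (h : (d.get? u).isSome) : ((l.foldl pvStepA d).get? u).isSome := by
  induction l generalizing d with
  | nil => exact h
  | cons r t ih => exact ih _ (pvStepA_mono d r u h)

theorem pvEntered_isSome (l : List String) (u : String) (h : pvEntered l u = true)
    (d : PySem.Dict String String) : ((l.foldl pvStepA d).get? u).isSome := by
  induction l generalizing d with
  | nil => simp [pvEntered] at h
  | cons r t ih =>
    unfold pvEntered at h
    rw [List.any_cons, Bool.or_eq_true] at h
    rcases h with h | h
    · rcases hs : PySem.Str.split₀ r with _ | ⟨c, _ | ⟨uu, _ | ⟨n, rest3⟩⟩⟩ <;>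
        rw [hs] at h <;> simp at h
      obtain ⟨hcc, huu⟩ := h
      subst huu
      have hstep : pvStepA d r = d.insert uu n := by
        unfold pvStepA
        rw [hs]
        rcases hcc with h1 | h1 <;> subst h1 <;> simp
      rw [List.foldl_cons, hstep]
      exact pvFoldA_mono t _ uu (by simp [PySem.Dict.get?_insert_self])
    · exact ih h _

theorem pvStepA2_eq (record : List String) (d : PySem.Dict String String)
    (hkey : ∀ u, pvEntered record u = true → (d.get? u).isSome)
    (res : List String) (r : String) (hr : r ∈ record) (hok : pvLineOK record r = true) :
    pvStepA2 d res r = res ++ (pvEv r).map (pvMsg d) := by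
  unfold pvLineOK at hok
  unfold pvStepA2 pvEv
  rcases hs : PySem.Str.split₀ r with _ | ⟨c, rest⟩
  · simp [hs] at hok
  · rw [hs] at hok
    by_cases hE : c = "Enter"
    · subst hE
      simp only [beq_self_eq_true, Bool.true_or, if_true] at hok ⊢
      rcases rest with _ | ⟨u, _ | ⟨n, rest3⟩⟩ <;> simp_all
      have hu : pvEntered record u = true := by
        unfold pvEntered
        rw [List.any_eq_true]
        exact ⟨r, hr, by rw [hs]; simp⟩
      obtain ⟨n', hn'⟩ := Option.isSome_iff_exists.mp (hkey u hu)
      rw [hn']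
      simp [pvMsg, hn']
    · by_cases hC : c = "Change"
      · subst hC
        rcases rest with _ | ⟨u, _ | ⟨n, rest3⟩⟩ <;> simp_all
      · by_cases hL : c = "Leave"
        · subst hL
          simp only [beq_iff_eq, reduceIte] at hok ⊢
          rcases rest with _ | ⟨u, rest2⟩
          · simp at hok
          · obtain ⟨n', hn'⟩ := Option.isSome_iff_exists.mp (hkey u hok)
            rcases rest2 with _ | ⟨n, rest3⟩ <;> simp_all [pvMsg]
        · rcases rest with _ | ⟨u, _ | ⟨n, rest3⟩⟩ <;> simp_all

theorem pvFoldA2_eq (record : List String) (d : PySem.Dict String String)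
    (hkey : ∀ u, pvEntered record u = true → (d.get? u).isSome)
    (l : List String) (hsub : ∀ r ∈ l, r ∈ record ∧ pvLineOK record r = true)
    (res : List String) :
    l.foldl (pvStepA2 d) res = res ++ (l.flatMap pvEv).map (pvMsg d) := by
  induction l generalizing res with
  | nil => simp
  | cons r t ih =>
    obtain ⟨hr, hok⟩ := hsub r (List.mem_cons_self)
    rw [List.foldl_cons, pvStepA2_eq record d hkey res r hr hok,
      ih (fun x hx => hsub x (List.mem_cons_of_mem _ hx))]
    simp [List.append_assoc]

-- ===== VERDICT (by name: the statement is the Claim_ definition above) =====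
theorem solution_spec : Claim_equal_solution := by
  intro record _ hpre
  unfold Spec_solution solution solution_alt
  rw [pvFoldB_eq]
  simp only [List.nil_append]
  have hkey : ∀ u, pvEntered record u = true →
      ((record.foldl pvStepA PySem.Dict.empty).get? u).isSome :=
    fun u hu => pvEntered_isSome record u hu _
  have hsub : ∀ r ∈ record, r ∈ record ∧ pvLineOK record r = true := by
    intro r hr
    exact ⟨hr, by unfold Pre_solution at hpre; exact List.all_eq_true.mp hpre r hr⟩
  rw [pvFoldA2_eq record _ hkey record hsub []]
  simp
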